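-- pv_equiv track=rewrite | github.com/HyeJoonKim/Algorithm | Heap/복기1.py | solution
-- ===== SOURCE A (Python) =====
-- import heapq
--
-- def solution(a):
--     min_q = []
--     max_q = []
--
--     for element in a:
--         heapq.heappush(min_q,element)
--         heapq.heappush(max_q,-element)
--
--     result = 0
--     cnt = 0
--     if len(a) % 2 == 0:
--         while cnt <= len(a):
--             if cnt % 2 == 0:
--                 result -= heapq.heappop(min_q)
--                 cnt += 1
--             else:
--                 result -= heapq.heappop(max_q)
--                 cnt += 1
--
--     else:
--         while cnt <= len(a):
--             if cnt % 2 != 0: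
--                 result -= heapq.heappop(min_q)
--                 cnt += 1
--             else:
--                 result -= heapq.heappop(max_q)
--                 cnt += 1
--
--     return result
-- ===== SOURCE B (Python) =====
-- def solution(a):
--     n = len(a)
--     s = sorted(a)
--     if n % 2 == 0:
--         m, k = n // 2 + 1, n // 2
--     else:
--         m = k = (n + 1) // 2
--     return sum(s[n - k:]) - sum(s[:m])
-- ===== Notes on version B (the rewrite author's own statement) =====
-- stated objective: simpler
-- what changed: Replaces the two heaps and the interleaved alternating pop loop by one sort plus two slice sums: the min-pops subtract the m smallest elements and the max-pops add the k largest, with m and k determined by the parity of len(a); this drops the heap pushes/pops for a constant-factor speedup.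
import Mathlib
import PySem

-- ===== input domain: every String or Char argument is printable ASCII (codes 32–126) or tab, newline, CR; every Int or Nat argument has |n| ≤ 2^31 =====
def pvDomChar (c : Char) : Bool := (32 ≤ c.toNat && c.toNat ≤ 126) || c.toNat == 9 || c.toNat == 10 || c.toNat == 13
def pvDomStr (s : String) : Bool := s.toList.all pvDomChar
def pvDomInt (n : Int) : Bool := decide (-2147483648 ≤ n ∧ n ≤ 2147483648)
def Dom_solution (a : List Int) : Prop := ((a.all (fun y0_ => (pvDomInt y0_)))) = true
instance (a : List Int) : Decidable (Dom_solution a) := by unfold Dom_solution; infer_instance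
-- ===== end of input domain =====

-- B replaces A's two heaps and interleaved alternating pop loop by one sort plus two
-- slice sums (objective: simpler). Pre_ excludes only the empty list, where A raises IndexError.

-- ===== PORT A =====
-- heapq model: the heap is its list of elements; heappush appends, heappop removes
-- (and returns) the first minimal element — the stdlib call's observable behaviour.
-- On an empty heap Python's heappop raises IndexError: excluded by Pre_solution
-- (the default (0, []) below is never reached under Pre_solution).
def heappush (q : List Int) (x : Int) : List Int := q ++ [x]

def heappopD (q : List Int) : Int × List Int :=
  match PySem.List.min? q (fun x => x) with
  | none => (0, [])
  | some m => (m, q.erase m)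

-- 'while cnt <= len(a)' with cnt incremented once per iteration runs exactly len(a)+1
-- times; the fuel argument counts the remaining iterations.
def loopEvenA : Nat → Nat → List Int → List Int → Int → Int
  | 0, _, _, _, r => r
  | t + 1, cnt, mq, xq, r =>
    if cnt % 2 = 0 then
      let p := heappopD mq
      loopEvenA t (cnt + 1) p.2 xq (r - p.1)
    else
      let p := heappopD xq
      loopEvenA t (cnt + 1) mq p.2 (r - p.1)

def loopOddA : Nat → Nat → List Int → List Int → Int → Int
  | 0, _, _, _, r => r
  | t + 1, cnt, mq, xq, r =>
    if cnt % 2 ≠ 0 then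
      let p := heappopD mq
      loopOddA t (cnt + 1) p.2 xq (r - p.1)
    else
      let p := heappopD xq
      loopOddA t (cnt + 1) mq p.2 (r - p.1)

def solution (a : List Int) : Int :=
  let min_q := a.foldl (fun q e => heappush q e) []
  let max_q := a.foldl (fun q e => heappush q (-e)) []
  if a.length % 2 = 0 then
    loopEvenA (a.length + 1) 0 min_q max_q 0
  else
    loopOddA (a.length + 1) 0 min_q max_q 0

-- ===== PORT B =====
def solution_alt (a : List Int) : Int :=
  let n := a.length
  let s := PySem.List.sorted a (fun x => x) false
  let mk : Nat × Nat := if n % 2 = 0 then (n / 2 + 1, n / 2) else ((n + 1) / 2, (n + 1) / 2)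
  (s.drop (n - mk.2)).sum - (s.take mk.1).sum

-- ===== PRECONDITION & SPEC =====
-- A pops len(a)+1 times from heaps of size len(a): on the empty list the very first
-- heappop raises IndexError, so exactly the empty list is excluded.
def Pre_solution (a : List Int) : Prop := a ≠ []
instance (a : List Int) : Decidable (Pre_solution a) := by unfold Pre_solution; infer_instance
def pvWitness_solution : List Int := [1]

def Spec_solution (a : List Int) (out : Int) : Prop := out = solution_alt a
instance (a : List Int) (out : Int) : Decidable (Spec_solution a out) := by unfold Spec_solution; infer_instance

-- ===== CLAIM (what is proved, stated in full; the proofs are below) =====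
def Claim_equal_solution : Prop := ∀ (a : List Int), Dom_solution a → Pre_solution a → Spec_solution a (solution a)

-- ===== LEMMAS AND PROOFS =====

-- number of j < t with (cnt + j) even
def evCount : Nat → Nat → Nat
  | _, 0 => 0
  | cnt, t + 1 => (if cnt % 2 = 0 then 1 else 0) + evCount (cnt + 1) t

-- sum of j pops
def popSum : List Int → Nat → Int
  | _, 0 => 0
  | q, j + 1 => (heappopD q).1 + popSum (heappopD q).2 j

theorem evCount_parity (t : Nat) : ∀ cnt, evCount (cnt + 2) t = evCount cnt t := by
  induction t with
  | zero => intro cnt; rfl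
  | succ t ih =>
    intro cnt
    simp [evCount, Nat.add_mod_right, ih (cnt + 1)]

theorem evCount_le (t : Nat) : ∀ cnt, evCount cnt t ≤ t := by
  induction t with
  | zero => intro cnt; simp [evCount]
  | succ t ih => intro cnt; simp only [evCount]; split <;> [skip; skip] <;> have := ih (cnt + 1) <;> omega

theorem evCount_closed (t : Nat) : evCount 0 t = (t + 1) / 2 ∧ evCount 1 t = t / 2 := by
  induction t with
  | zero => exact ⟨rfl, rfl⟩
  | succ t ih =>
    refine ⟨?_, ?_⟩
    · show (if 0 % 2 = 0 then 1 else 0) + evCount 1 t = (t + 2) / 2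
      simp [ih.2]; omega
    · show (if 1 % 2 = 0 then 1 else 0) + evCount 2 t = (t + 1) / 2
      have h2 : evCount 2 t = evCount 0 t := evCount_parity t 0
      simp [h2, ih.1]

theorem loopEvenA_eq (t : Nat) : ∀ cnt mq xq r,
    loopEvenA t cnt mq xq r = r - popSum mq (evCount cnt t) - popSum xq (t - evCount cnt t) := by
  induction t with
  | zero => intro cnt mq xq r; simp [loopEvenA, evCount, popSum]
  | succ t ih =>
    intro cnt mq xq r
    by_cases h : cnt % 2 = 0
    · have hev : evCount cnt (t + 1) = evCount (cnt + 1) t + 1 := by simp [evCount, h, Nat.add_comm]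
      simp only [loopEvenA, if_pos h, ih]
      rw [hev]
      have hpar : (cnt + 1) % 2 ≠ 0 := by omega
      have hle : evCount (cnt + 1) t ≤ t := evCount_le t (cnt + 1)
      simp only [popSum]
      have : t + 1 - (evCount (cnt + 1) t + 1) = t - evCount (cnt + 1) t := by omega
      rw [this]; ring
    · have hev : evCount cnt (t + 1) = evCount (cnt + 1) t := by simp [evCount, h]
      simp only [loopEvenA, if_neg h, ih]
      rw [hev]
      have hle : evCount (cnt + 1) t ≤ t := evCount_le t (cnt + 1)
      have : t + 1 - evCount (cnt + 1) t = (t - evCount (cnt + 1) t) + 1 := by omega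
      rw [this]
      simp only [popSum]
      ring

theorem loopOddA_eq (t : Nat) : ∀ cnt mq xq r,
    loopOddA t cnt mq xq r = r - popSum mq (t - evCount cnt t) - popSum xq (evCount cnt t) := by
  induction t with
  | zero => intro cnt mq xq r; simp [loopOddA, evCount, popSum]
  | succ t ih =>
    intro cnt mq xq r
    by_cases h : cnt % 2 = 0
    · have hev : evCount cnt (t + 1) = evCount (cnt + 1) t + 1 := by simp [evCount, h, Nat.add_comm]
      simp only [loopOddA, h, ne_eq, not_true_eq_false, if_false, ih]
      rw [hev]
      have hle : evCount (cnt + 1) t ≤ t := evCount_le t (cnt + 1)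
      have : t + 1 - (evCount (cnt + 1) t + 1) = t - evCount (cnt + 1) t := by omega
      rw [this]
      simp only [popSum]
      ring
    · have hev : evCount cnt (t + 1) = evCount (cnt + 1) t := by simp [evCount, h]
      simp only [loopOddA, ne_eq, h, not_false_eq_true, if_true, ih]
      rw [hev]
      have hle : evCount (cnt + 1) t ≤ t := evCount_le t (cnt + 1)
      have : t + 1 - evCount (cnt + 1) t = (t - evCount (cnt + 1) t) + 1 := by omega
      rw [this]
      simp only [popSum]
      ring

theorem sum_map_neg_int (l : List Int) : (l.map (fun x => -x)).sum = -l.sum := by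
  induction l with
  | nil => simp
  | cons x t ih => simp [ih]; ring

theorem pop_sorted (q : List Int) (h : q ≠ []) :
    PySem.List.sorted q (fun x => x) false
      = (heappopD q).1 :: PySem.List.sorted (heappopD q).2 (fun x => x) false := by
  obtain ⟨m, hm⟩ : ∃ m, PySem.List.min? q (fun x => x) = some m := by
    cases hq : PySem.List.min? q (fun x => x) with
    | none => exact absurd ((PySem.List.min?_eq_none_iff q _).mp hq) h
    | some m => exact ⟨m, rfl⟩
  have hpop1 : (heappopD q).1 = m := by simp [heappopD, hm]
  have hpop2 : (heappopD q).2 = q.erase m := by simp [heappopD, hm]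
  rw [hpop1, hpop2]
  obtain ⟨hd, t, hs⟩ : ∃ hd t, PySem.List.sorted q (fun x => x) false = hd :: t := by
    cases hq : PySem.List.sorted q (fun x => x) false with
    | nil => exact absurd ((PySem.List.sorted_eq_nil_iff q _ false).mp hq) h
    | cons hd t => exact ⟨hd, t, rfl⟩
  have hhd_mem : hd ∈ q := by
    rw [← PySem.List.mem_sorted q (fun x => x) false, hs]; exact List.mem_cons_self
  have hmeq : m = hd :=
    le_antisymm (PySem.List.min?_isMin hm hd hhd_mem)
      (PySem.List.key_head_sorted_le q (fun x => x) hs m (PySem.List.min?_mem hm))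
  subst hmeq
  have hp := PySem.List.sorted_perm q (fun x => x) false
  rw [hs] at hp
  have hpe : ((m :: t).erase m).Perm (q.erase m) := List.Perm.erase m hp
  rw [List.erase_cons_head] at hpe
  have hpt : List.Pairwise (fun a b : Int => a ≤ b) t := by
    have := PySem.List.sorted_pairwise q (fun x => x)
    rw [hs] at this
    exact (List.pairwise_cons.mp this).2
  rw [hs]
  congr 1
  rw [PySem.List.sorted_eq_sorted_of_perm (q.erase m) t (fun x => x)
        (fun x y hxy => hxy) hpe.symm]
  exact (PySem.List.sorted_eq_self_of_pairwise t (fun x => x) hpt).symm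

theorem popSum_sorted (j : Nat) : ∀ q : List Int, j ≤ q.length →
    popSum q j = ((PySem.List.sorted q (fun x => x) false).take j).sum := by
  induction j with
  | zero => intro q _; simp [popSum]
  | succ j ih =>
    intro q hj
    have hne : q ≠ [] := by intro he; rw [he] at hj; simp at hj
    have hps := pop_sorted q hne
    have hlen : (heappopD q).2.length + 1 = q.length := by
      have h1 := PySem.List.length_sorted q (fun x => x) false
      have h2 := PySem.List.length_sorted (heappopD q).2 (fun x => x) false
      rw [hps] at h1
      simp at h1
      omega
    rw [hps]
    simp only [popSum, List.take_succ_cons, List.sum_cons]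
    rw [ih (heappopD q).2 (by omega)]

theorem sorted_neg (a : List Int) :
    PySem.List.sorted (a.map (fun x => -x)) (fun x => x) false
      = ((PySem.List.sorted a (fun x => x) false).map (fun x => -x)).reverse := by
  apply PySem.List.sorted_id_eq_of_perm_of_pairwise
  · exact (List.reverse_perm _).trans ((PySem.List.sorted_perm a (fun x => x) false).map _)
  · rw [List.pairwise_reverse, List.pairwise_map]
    exact (PySem.List.sorted_pairwise a (fun x => x)).imp (by intro x y hxy; simpa using hxy)

theorem topSum (s : List Int) (k : Nat) :
    (((s.map (fun x => -x)).reverse).take k).sum = -((s.drop (s.length - k)).sum) := by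
  rw [← List.map_reverse, ← List.map_take, sum_map_neg_int, List.take_reverse, List.sum_reverse]

theorem solution_spec : Claim_equal_solution := by
  intro a _ hpre
  show solution a = solution_alt a
  have hn0 : 0 < a.length := List.length_pos_iff.mpr hpre
  unfold solution solution_alt heappush
  simp only [PySem.List.foldl_append_singleton a [], List.nil_append]
  rw [show (a.foldl (fun q e => q ++ [-e]) []) = a.map (fun e => -e) from
        PySem.List.foldl_append_singleton_eq_map (fun e => -e) a []]
  set n := a.length with hn
  set s := PySem.List.sorted a (fun x => x) false with hsdef
  have hslen : s.length = n := PySem.List.length_sorted a (fun x => x) false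
  have hev := evCount_closed (n + 1)
  by_cases h : n % 2 = 0
  · simp only [if_pos h]
    rw [loopEvenA_eq]
    rw [hev.1]
    have hm : (n + 1 + 1) / 2 = n / 2 + 1 := by omega
    have hk : n + 1 - (n + 1 + 1) / 2 = n / 2 := by omega
    rw [hk, hm]
    have hn2 : 2 ≤ n := by omega
    rw [popSum_sorted (n / 2 + 1) a (by omega)]
    rw [popSum_sorted (n / 2) (a.map (fun e => -e)) (by simp; omega)]
    rw [sorted_neg, ← hsdef, topSum, hslen]
    ring
  · simp only [if_neg h]
    rw [loopOddA_eq]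
    rw [hev.1]
    have hm : n + 1 - (n + 1 + 1) / 2 = (n + 1) / 2 := by omega
    have hk : (n + 1 + 1) / 2 = (n + 1) / 2 := by omega
    rw [hm, hk]
    rw [popSum_sorted ((n + 1) / 2) a (by omega)]
    rw [popSum_sorted ((n + 1) / 2) (a.map (fun e => -e)) (by simp; omega)]
    rw [sorted_neg, ← hsdef, topSum, hslen]
    ring
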